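-- pv_equiv track=rewrite | github.com/Plick000/open-source-dubbing-tool | Python/V1/__chunks_timestamps_cal__.py | find_exact_subsequence
-- ===== SOURCE A (Python) =====
-- import bisect
-- from typing import Any, Dict, List, Optional, Tuple
--
-- def _lookahead_for_len(clen: int) -> int:
--     # Prevent false matches far ahead (the main cause of “wrong” results).
--     if clen <= 8:
--         return 350
--     if clen <= 15:
--         return 800
--     return 2200
--
-- def find_exact_subsequence(
--     audio_norms: List[str],
--     pos_index: Dict[str, List[int]],
--     chunk_words: List[str],
--     start_idx: int,
--     max_candidates: int = 5000,
-- ) -> Tuple[Optional[int], Optional[int]]: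
--     if not chunk_words:
--         return None, None
--
--     first = chunk_words[0]
--     if first not in pos_index:
--         return None, None
--
--     lookahead = _lookahead_for_len(len(chunk_words))
--     limit = min(len(audio_norms) - 1, start_idx + lookahead)
--
--     cand_list = pos_index[first]
--     j = bisect.bisect_left(cand_list, start_idx)
--
--     clen = len(chunk_words)
--     alen = len(audio_norms)
--     tried = 0
--
--     while j < len(cand_list) and tried < max_candidates:
--         s = cand_list[j]
--         j += 1
--         tried += 1
--
--         if s > limit:
--             break
--         if s + clen > alen:
--             break
--
--         if audio_norms[s:s + clen] == chunk_words:
--             return s, s + clen - 1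
--
--     return None, None
-- ===== SOURCE B (Python) =====
-- import bisect
-- from typing import Dict, List, Optional, Tuple
--
--
-- def _lookahead_for_len(clen: int) -> int:
--     if clen <= 8:
--         return 350
--     if clen <= 15:
--         return 800
--     return 2200
--
--
-- def find_exact_subsequence(
--     audio_norms: List[str],
--     pos_index: Dict[str, List[int]],
--     chunk_words: List[str],
--     start_idx: int,
--     max_candidates: int = 5000,
-- ) -> Tuple[Optional[int], Optional[int]]:
--     # Scan the bounded audio window position by position, consulting a set of
--     # the budgeted candidate positions, instead of walking the candidate list
--     # with a counter and break conditions.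
--     if not chunk_words:
--         return None, None
--     positions = pos_index.get(chunk_words[0])
--     if positions is None:
--         return None, None
--     if max_candidates <= 0:
--         return None, None
--
--     clen = len(chunk_words)
--     alen = len(audio_norms)
--     hi = min(alen - 1, start_idx + _lookahead_for_len(clen), alen - clen)
--     lo = bisect.bisect_left(positions, start_idx)
--     allowed = set(positions[lo:lo + max_candidates])
--
--     for s in range(max(start_idx, 0), hi + 1):
--         if s in allowed and audio_norms[s:s + clen] == chunk_words:
--             return s, s + clen - 1
--     return None, None
-- ===== Notes on version B (the rewrite author's own statement) =====
-- stated objective: alternative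
-- what changed: B drops A's candidate-list walk (mutable index, tried counter, sequential break conditions) in favour of clipping the search window arithmetically, building a set of the budgeted candidate positions once, and scanning the audio window positions in ascending order with a membership test.
-- outside the precondition, e.g. on find_exact_subsequence(['a', 'b'], {'a': [5, 0]}, ['a'], 0, 5000): A returns (None, None), B returns (0, 0)
import Mathlib
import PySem

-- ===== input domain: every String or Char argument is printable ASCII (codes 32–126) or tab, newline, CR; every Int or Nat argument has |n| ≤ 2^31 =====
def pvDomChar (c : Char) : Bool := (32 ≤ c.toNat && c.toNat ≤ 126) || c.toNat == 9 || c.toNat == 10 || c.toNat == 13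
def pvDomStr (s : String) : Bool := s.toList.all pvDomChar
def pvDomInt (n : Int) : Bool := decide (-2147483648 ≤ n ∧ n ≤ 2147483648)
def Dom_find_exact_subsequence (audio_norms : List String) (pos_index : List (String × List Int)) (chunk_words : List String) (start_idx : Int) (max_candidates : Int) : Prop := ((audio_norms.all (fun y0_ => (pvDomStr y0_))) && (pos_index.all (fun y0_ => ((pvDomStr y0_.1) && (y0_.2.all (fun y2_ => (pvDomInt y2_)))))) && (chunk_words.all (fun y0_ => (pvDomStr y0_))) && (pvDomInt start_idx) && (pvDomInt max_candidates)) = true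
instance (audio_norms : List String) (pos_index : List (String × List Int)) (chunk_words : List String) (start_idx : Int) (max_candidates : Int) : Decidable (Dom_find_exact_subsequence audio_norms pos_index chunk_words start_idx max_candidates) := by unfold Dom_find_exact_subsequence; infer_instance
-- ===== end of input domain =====

-- B replaces A's candidate-list walk (index, tried counter, break conditions) by an
-- arithmetically clipped window, a set of the budgeted candidates built once, and an
-- ascending scan of the audio window positions; same cost class, alternative structure.

-- ===== PORT A =====
-- _lookahead_for_len, as defined in Source A
def pvLookaheadA (clen : Int) : Int :=
  if clen ≤ 8 then 350 else if clen ≤ 15 then 800 else 2200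

-- the 'while j < len(cand_list) and tried < max_candidates' loop of A
def pvLoopA (audio chunk : List String) (cand : List Int)
    (limit clen alen maxc : Int) (j : Nat) (tried : Int) :
    Option Int × Option Int :=
  if h : j < cand.length ∧ tried < maxc then
    let s := cand.getD j 0
    if s > limit then (none, none)
    else if s + clen > alen then (none, none)
    else if PySem.List.slice audio (some s) (some (s + clen)) = chunk then
      (some s, some (s + clen - 1))
    else pvLoopA audio chunk cand limit clen alen maxc (j + 1) (tried + 1)
  else (none, none)
termination_by cand.length - j
decreasing_by omega

def find_exact_subsequence (audio_norms : List String) (pos_index : List (String × List Int)) (chunk_words : List String) (start_idx : Int) (max_candidates : Int) : Option Int × Option Int :=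
  if chunk_words = [] then (none, none)
  else
    let first := chunk_words.headD ""
    match (PySem.Dict.mk pos_index).get? first with
    | none => (none, none)
    | some cand_list =>
        let lookahead := pvLookaheadA (chunk_words.length : Int)
        let limit := min ((audio_norms.length : Int) - 1) (start_idx + lookahead)
        let j := PySem.List.bisectLeft cand_list start_idx
        pvLoopA audio_norms chunk_words cand_list limit (chunk_words.length : Int)
          (audio_norms.length : Int) max_candidates j 0

-- ===== PORT B =====
-- _lookahead_for_len, as defined in Source B (same text as in Source A)
def pvLookaheadB (clen : Int) : Int :=
  if clen ≤ 8 then 350 else if clen ≤ 15 then 800 else 2200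

-- the 'for s in range(max(start_idx, 0), hi + 1)' loop of B
def pvLoopB (audio chunk : List String) (allowed : PySem.Set Int)
    (clen s hi : Int) : Option Int × Option Int :=
  if hle : s ≤ hi then
    if PySem.Set.contains allowed s
        && decide (PySem.List.slice audio (some s) (some (s + clen)) = chunk) then
      (some s, some (s + clen - 1))
    else pvLoopB audio chunk allowed clen (s + 1) hi
  else (none, none)
termination_by (hi + 1 - s).toNat
decreasing_by omega

def find_exact_subsequence_alt (audio_norms : List String) (pos_index : List (String × List Int)) (chunk_words : List String) (start_idx : Int) (max_candidates : Int) : Option Int × Option Int :=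
  if chunk_words = [] then (none, none)
  else
    match (PySem.Dict.mk pos_index).get? (chunk_words.headD "") with
    | none => (none, none)
    | some positions =>
        if max_candidates ≤ 0 then (none, none)
        else
          let clen := (chunk_words.length : Int)
          let alen := (audio_norms.length : Int)
          let hi := min (min (alen - 1) (start_idx + pvLookaheadB clen)) (alen - clen)
          let lo := PySem.List.bisectLeft positions start_idx
          let allowed := PySem.Set.ofList
            (PySem.List.slice positions (some (lo : Int)) (some ((lo : Int) + max_candidates)))
          pvLoopB audio_norms chunk_words allowed clen (max start_idx 0) hi

-- ===== PRECONDITION & SPEC =====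
-- Pre_ excludes inputs whose consulted position list pos_index[chunk_words[0]] is unsorted
-- (bisect's sorted-input contract is violated, so A's scan order and break cutoffs are
-- accidental) or contains a negative position (where Python's negative-slice wraparound makes
-- A's window comparison accidental); B does the natural thing there.
def Pre_find_exact_subsequence (audio_norms : List String) (pos_index : List (String × List Int)) (chunk_words : List String) (start_idx : Int) (max_candidates : Int) : Prop :=
  chunk_words = [] ∨
    ((((PySem.Dict.mk pos_index).get? (chunk_words.headD "")).getD []).Pairwise (· ≤ ·) ∧
      ∀ y ∈ (((PySem.Dict.mk pos_index).get? (chunk_words.headD "")).getD []), 0 ≤ y)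
instance (audio_norms : List String) (pos_index : List (String × List Int)) (chunk_words : List String) (start_idx : Int) (max_candidates : Int) : Decidable (Pre_find_exact_subsequence audio_norms pos_index chunk_words start_idx max_candidates) := by unfold Pre_find_exact_subsequence; infer_instance

def pvWitness_find_exact_subsequence : List String × (List (String × List Int)) × List String × Int × Int :=
  (["a", "b"], [("a", [0, 1])], ["a", "b"], 0, 5000)

def Spec_find_exact_subsequence (audio_norms : List String) (pos_index : List (String × List Int)) (chunk_words : List String) (start_idx : Int) (max_candidates : Int) (out : Option Int × Option Int) : Prop := out = find_exact_subsequence_alt audio_norms pos_index chunk_words start_idx max_candidates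
instance (audio_norms : List String) (pos_index : List (String × List Int)) (chunk_words : List String) (start_idx : Int) (max_candidates : Int) (out : Option Int × Option Int) : Decidable (Spec_find_exact_subsequence audio_norms pos_index chunk_words start_idx max_candidates out) := by unfold Spec_find_exact_subsequence; infer_instance

-- ===== CLAIM (what is proved, stated in full; the proofs are below) =====
def Claim_equal_find_exact_subsequence : Prop := ∀ (audio_norms : List String) (pos_index : List (String × List Int)) (chunk_words : List String) (start_idx : Int) (max_candidates : Int), Dom_find_exact_subsequence audio_norms pos_index chunk_words start_idx max_candidates → Pre_find_exact_subsequence audio_norms pos_index chunk_words start_idx max_candidates → Spec_find_exact_subsequence audio_norms pos_index chunk_words start_idx max_candidates (find_exact_subsequence audio_norms pos_index chunk_words start_idx max_candidates)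

-- ===== LEMMAS AND PROOFS =====

-- A's loop, restated structurally on the remaining budgeted candidate list
def pvFind (audio chunk : List String) (limit clen alen : Int) : List Int → Option Int × Option Int
  | [] => (none, none)
  | s :: t =>
    if s > limit then (none, none)
    else if s + clen > alen then (none, none)
    else if PySem.List.slice audio (some s) (some (s + clen)) = chunk then
      (some s, some (s + clen - 1))
    else pvFind audio chunk limit clen alen t

-- wrap a found position into the common return shape
def pvOut (clen : Int) : Option Int → Option Int × Option Int
  | some s => (some s, some (s + clen - 1))
  | none => (none, none)

theorem pvLoopA_eq_pvFind (audio chunk : List String) (cand : List Int)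
    (limit clen alen maxc : Int) (j : Nat) (tried : Int) :
    pvLoopA audio chunk cand limit clen alen maxc j tried =
      pvFind audio chunk limit clen alen ((cand.drop j).take (maxc - tried).toNat) := by
  fun_induction pvLoopA audio chunk cand limit clen alen maxc j tried with
  | case1 j tried h s h1 =>
    rw [List.drop_eq_getElem_cons h.1]
    have ht : (maxc - tried).toNat = (maxc - (tried + 1)).toNat + 1 := by omega
    rw [ht, List.take_succ_cons, pvFind]
    have hs : s = cand[j] := by simp [s, List.getD_eq_getElem?_getD, List.getElem?_eq_getElem h.1]
    rw [← hs, if_pos h1]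
  | case2 j tried h s h1 h2 =>
    rw [List.drop_eq_getElem_cons h.1]
    have ht : (maxc - tried).toNat = (maxc - (tried + 1)).toNat + 1 := by omega
    rw [ht, List.take_succ_cons, pvFind]
    have hs : s = cand[j] := by simp [s, List.getD_eq_getElem?_getD, List.getElem?_eq_getElem h.1]
    rw [← hs, if_neg h1, if_pos h2]
  | case3 j tried h s h1 h2 h3 =>
    rw [List.drop_eq_getElem_cons h.1]
    have ht : (maxc - tried).toNat = (maxc - (tried + 1)).toNat + 1 := by omega
    rw [ht, List.take_succ_cons, pvFind]
    have hs : s = cand[j] := by simp [s, List.getD_eq_getElem?_getD, List.getElem?_eq_getElem h.1]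
    rw [← hs, if_neg h1, if_neg h2, if_pos h3]
  | case4 j tried h s h1 h2 h3 ih =>
    rw [List.drop_eq_getElem_cons h.1]
    have ht : (maxc - tried).toNat = (maxc - (tried + 1)).toNat + 1 := by omega
    rw [ht, List.take_succ_cons, pvFind]
    have hs : s = cand[j] := by simp [s, List.getD_eq_getElem?_getD, List.getElem?_eq_getElem h.1]
    rw [← hs, if_neg h1, if_neg h2, if_neg h3, ih]
  | case5 j tried h =>
    rcases Nat.lt_or_ge j cand.length with hj | hj
    · have : ¬ tried < maxc := fun hc => h ⟨hj, hc⟩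
      have : (maxc - tried).toNat = 0 := by omega
      simp [this, pvFind]
    · simp [List.drop_eq_nil_of_le hj, pvFind]

theorem pvFind_eq_find? (audio chunk : List String) (limit clen alen : Int)
    (L : List Int) (hs : L.Pairwise (· ≤ ·)) :
    pvFind audio chunk limit clen alen L =
      pvOut clen (L.find? (fun s =>
        decide (s ≤ min limit (alen - clen)) &&
        decide (PySem.List.slice audio (some s) (some (s + clen)) = chunk))) := by
  induction L with
  | nil => rfl
  | cons s t ih =>
    have hst := (List.pairwise_cons.mp hs).1
    have hts := (List.pairwise_cons.mp hs).2
    by_cases h1 : s > limit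
    · rw [pvFind, if_pos h1]
      have hall : ∀ v ∈ s :: t, ¬ ((decide (v ≤ min limit (alen - clen)) &&
          decide (PySem.List.slice audio (some v) (some (v + clen)) = chunk)) = true) := by
        intro v hv
        have hsv : s ≤ v := by
          rcases List.mem_cons.mp hv with rfl | hv'
          · exact le_refl v
          · exact hst v hv'
        simp only [Bool.and_eq_true, decide_eq_true_eq, not_and]
        intro hle _
        omega
      rw [List.find?_eq_none.mpr hall]
      rfl
    · by_cases h2 : s + clen > alen
      · rw [pvFind, if_neg h1, if_pos h2]
        have hall : ∀ v ∈ s :: t, ¬ ((decide (v ≤ min limit (alen - clen)) &&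
            decide (PySem.List.slice audio (some v) (some (v + clen)) = chunk)) = true) := by
          intro v hv
          have hsv : s ≤ v := by
            rcases List.mem_cons.mp hv with rfl | hv'
            · exact le_refl v
            · exact hst v hv'
          simp only [Bool.and_eq_true, decide_eq_true_eq, not_and]
          intro hle _
          omega
        rw [List.find?_eq_none.mpr hall]
        rfl
      · by_cases h3 : PySem.List.slice audio (some s) (some (s + clen)) = chunk
        · rw [pvFind, if_neg h1, if_neg h2, if_pos h3]
          rw [List.find?_cons_of_pos]
          · rfl
          · simp only [Bool.and_eq_true, decide_eq_true_eq]
            exact ⟨by omega, h3⟩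
        · rw [pvFind, if_neg h1, if_neg h2, if_neg h3]
          rw [List.find?_cons_of_neg]
          · exact ih hts
          · simp only [Bool.and_eq_true, decide_eq_true_eq, not_and]
            intro _ hc
            exact absurd hc h3

-- in a sorted list, everything strictly below the first hit fails the predicate
theorem sorted_find?_min {L : List Int} {p : Int → Bool} {s : Int}
    (hs : L.Pairwise (· ≤ ·)) (h : L.find? p = some s) :
    ∀ v ∈ L, v < s → p v = false := by
  induction L with
  | nil => simp
  | cons w t ih =>
    have hwt := (List.pairwise_cons.mp hs).1
    have hts := (List.pairwise_cons.mp hs).2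
    intro v hv hvs
    by_cases hp : p w = true
    · rw [List.find?_cons_of_pos hp] at h
      injection h with h
      subst h
      rcases List.mem_cons.mp hv with rfl | hv'
      · omega
      · exact absurd (hwt v hv') (by omega)
    · rw [List.find?_cons_of_neg hp] at h
      rcases List.mem_cons.mp hv with rfl | hv'
      · exact Bool.not_eq_true _ ▸ (by simpa using hp)
      · exact ih hts h v hv' hvs

theorem find?_pyRange_eq_some_of {p : Int → Bool} {a b s : Int}
    (h1 : a ≤ s) (h2 : s < b) (h3 : p s = true)
    (h4 : ∀ v, a ≤ v → v < s → p v = false) :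
    (PySem.List.pyRange a b 1).find? p = some s := by
  generalize hn : (b - a).toNat = n
  induction n generalizing a with
  | zero => omega
  | succ n ih =>
    rw [PySem.List.pyRange_one_cons (by omega)]
    by_cases has : a = s
    · subst has
      rw [List.find?_cons_of_pos h3]
    · rw [List.find?_cons_of_neg (by rw [h4 a (le_refl a) (by omega)]; simp)]
      exact ih (by omega) (fun v hv1 hv2 => h4 v (by omega) hv2) (by omega)

theorem pvLoopB_eq_find? (audio chunk : List String) (allowed : PySem.Set Int)
    (clen s hi : Int) :
    pvLoopB audio chunk allowed clen s hi =
      pvOut clen ((PySem.List.pyRange s (hi + 1) 1).find? (fun v =>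
        PySem.Set.contains allowed v &&
        decide (PySem.List.slice audio (some v) (some (v + clen)) = chunk))) := by
  fun_induction pvLoopB audio chunk allowed clen s hi with
  | case1 s h hp =>
    rw [PySem.List.pyRange_one_cons (by omega)]
    simp only [List.find?_cons, hp]
    rfl
  | case2 s h hp ih =>
    have hp' : (PySem.Set.contains allowed s
        && decide (PySem.List.slice audio (some s) (some (s + clen)) = chunk)) = false := by
      simpa using hp
    rw [PySem.List.pyRange_one_cons (by omega)]
    simp only [List.find?_cons, hp']
    exact ih
  | case3 s h =>
    rw [PySem.List.pyRange_one_eq_nil (by omega)]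
    rfl

-- the core: first hit of A's budgeted sorted window = first hit of B's ascending window scan
theorem find?_window_eq (audio chunk : List String) (W : List Int)
    (x limit clen alen : Int)
    (hs : W.Pairwise (· ≤ ·)) (hge : ∀ y ∈ W, x ≤ y) (hnn : ∀ y ∈ W, 0 ≤ y) :
    (W.find? (fun s =>
        decide (s ≤ min limit (alen - clen)) &&
        decide (PySem.List.slice audio (some s) (some (s + clen)) = chunk))) =
      ((PySem.List.pyRange (max x 0) (min limit (alen - clen) + 1) 1).find? (fun v =>
        PySem.Set.contains (PySem.Set.ofList W) v &&
        decide (PySem.List.slice audio (some v) (some (v + clen)) = chunk))) := by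
  have hc : ∀ v : Int, PySem.Set.contains (PySem.Set.ofList W) v = true ↔ v ∈ W := by
    intro v
    simp [PySem.Set.contains, PySem.Set.mem_ofList]
  set hi := min limit (alen - clen) with hhi
  cases hW : W.find? (fun s =>
      decide (s ≤ hi) &&
      decide (PySem.List.slice audio (some s) (some (s + clen)) = chunk)) with
  | none =>
    rw [List.find?_eq_none] at hW
    symm
    rw [List.find?_eq_none]
    intro v hv
    have hvr := (PySem.List.mem_pyRange_one).mp hv
    simp only [Bool.and_eq_true, not_and]
    intro hcv hmv
    have hvW : v ∈ W := (hc v).mp hcv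
    have := hW v hvW
    simp only [Bool.and_eq_true, not_and, decide_eq_true_eq] at this
    exact (this (by omega)) (by simpa using hmv)
  | some s =>
    have hq := List.find?_some hW
    have hmem := List.mem_of_find?_eq_some hW
    have hmin := sorted_find?_min hs hW
    simp only [Bool.and_eq_true, decide_eq_true_eq] at hq
    symm
    apply find?_pyRange_eq_some_of
    · exact max_le (hge s hmem) (hnn s hmem)
    · omega
    · simp only [Bool.and_eq_true]
      exact ⟨(hc s).mpr hmem, by simpa using hq.2⟩
    · intro v hv1 hv2
      by_contra hr
      rw [Bool.not_eq_false, Bool.and_eq_true] at hr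
      have hvW : v ∈ W := (hc v).mp hr.1
      have hqv := hmin v hvW hv2
      rw [Bool.and_eq_false_iff] at hqv
      rcases hqv with h' | h'
      · simp only [decide_eq_false_iff_not] at h'
        omega
      · rw [← h'.symm] at hr
        exact absurd hr.2 (by simp)

-- ===== VERDICT (by name: the statement is the Claim_ definition above) =====
theorem find_exact_subsequence_spec : Claim_equal_find_exact_subsequence := by
  intro audio pos chunk start mc _hdom hpre
  unfold Spec_find_exact_subsequence
  unfold find_exact_subsequence find_exact_subsequence_alt
  by_cases hchunk : chunk = []
  · simp [hchunk]
  · simp only [if_neg hchunk]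
    cases hget : (PySem.Dict.mk pos).get? (chunk.headD "") with
    | none => rfl
    | some P =>
      dsimp only
      have hP : P.Pairwise (· ≤ ·) ∧ ∀ y ∈ P, 0 ≤ y := by
        rcases hpre with h | h
        · exact absurd h hchunk
        · simpa only [hget, Option.getD_some] using h
      obtain ⟨hsort, hnnP⟩ := hP
      obtain ⟨hjle, _, hjge⟩ := PySem.List.bisectLeft_spec P start hsort
      set j := PySem.List.bisectLeft P start with hj
      set clen := (chunk.length : Int) with hclen
      set alen := (audio.length : Int) with halen
      set la := pvLookaheadA clen with hla
      have hlaB : pvLookaheadB clen = la := rfl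
      set limit := min (alen - 1) (start + la) with hlimit
      set W := (P.drop j).take mc.toNat with hW
      -- window facts
      have hsubW : W.Sublist P := ((P.drop j).take_sublist _).trans (P.drop_sublist j)
      have hsW : W.Pairwise (· ≤ ·) := hsort.sublist hsubW
      have hnnW : ∀ y ∈ W, 0 ≤ y := fun y hy => hnnP y (hsubW.mem hy)
      have hgeW : ∀ y ∈ W, start ≤ y := by
        intro y hy
        have hy' : y ∈ P.drop j := List.mem_of_mem_take hy
        obtain ⟨k, hk, hky⟩ := List.mem_iff_getElem.mp hy'
        rw [List.getElem_drop] at hky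
        subst hky
        exact hjge (j + k) (by simp at hk; omega) (by omega)
      rw [pvLoopA_eq_pvFind]
      have h0 : (mc - 0 : Int).toNat = mc.toNat := by omega
      rw [h0, ← hW]
      rw [pvFind_eq_find? audio chunk limit clen alen W hsW]
      by_cases hmc : mc ≤ 0
      · rw [if_pos hmc]
        have : W = [] := by
          rw [hW]
          have : mc.toNat = 0 := by omega
          rw [this, List.take_zero]
        rw [this]
        rfl
      · rw [if_neg hmc]
        have hslice : PySem.List.slice P (some (j : Int)) (some ((j : Int) + mc)) = W := by
          rw [PySem.List.slice_toNat P (by positivity) (by omega)]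
          rw [hW]
          congr 1
          omega
        rw [hlaB, hslice]
        rw [pvLoopB_eq_find? audio chunk (PySem.Set.ofList W) clen (max start 0)
          (min limit (alen - clen))]
        rw [find?_window_eq audio chunk W start limit clen alen hsW hgeW hnnW]
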